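-- pv_equiv track=rewrite | github.com/ini/numthy | solve.py | problem_277
-- ===== SOURCE A (Python) =====
-- def problem_277(N=10**15, sequence='UDDDUdddDDUDDddDdDddDDUDDdUUDd'):
--     """
--     Find the smallest positive integer n > N such that the sequence of operations
--     "U" (multiply by 3), "D" (divide by 2), and "d" (decrement by 1) on n
--     produces the given sequence.
--
--     Notes
--     -----
--     Any two integers whose sequences begin with the same k elements
--     must be equivalent mod 3^k.
--
--     We can reverse-engineer the sequence by starting with the final value and
--     working backwards, obtaining a rational number a/b.
--
--     Then the smallest integer that produces our sequence is n = a * b^(-1) mod 3^k,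
--     where b^(-1) is the modular inverse of b mod 3^k.
--     """
--     a, b = 1, 1
--     for step in reversed(sequence):
--         if step == 'D':
--             a *= 3
--         elif step == 'U':
--             a, b = 3*a - 2*b, 4*b
--         elif step == 'd':
--             a, b = 3*a + b, 2*b
--
--     mod = 3**len(sequence)
--     n = a * pow(b, -1, mod=mod)
--     return N + (n - N) % mod
-- ===== SOURCE B (Python) =====
-- def problem_277(N=10**15, sequence='UDDDUdddDDUDDddDdDddDDUDDdUUDd'):
--     mod = 3 ** len(sequence)
--     m4 = mod % 4
--     v = 1 % mod
--     for step in reversed(sequence):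
--         if step == 'D':
--             v = 3 * v % mod
--         elif step == 'U':
--             t = (3 * v - 2) % mod
--             v = (t + -t * m4 % 4 * mod) // 4
--         elif step == 'd':
--             t = (3 * v + 1) % mod
--             v = (t + t % 2 * mod) // 2
--     return N + (v - N) % mod
-- ===== Notes on version B (the rewrite author's own statement) =====
-- stated objective: alternative
-- what changed: B replaces A's exact rational pair (a,b) of unbounded big integers and the final modular inversion pow(b,-1,3^k) by a single residue v kept reduced mod 3^k throughout: divisions by 2 and 4 are undone by adding the unique small multiple of the odd modulus that makes the value exactly divisible, so no modular inverse is computed at all.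
import Mathlib
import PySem

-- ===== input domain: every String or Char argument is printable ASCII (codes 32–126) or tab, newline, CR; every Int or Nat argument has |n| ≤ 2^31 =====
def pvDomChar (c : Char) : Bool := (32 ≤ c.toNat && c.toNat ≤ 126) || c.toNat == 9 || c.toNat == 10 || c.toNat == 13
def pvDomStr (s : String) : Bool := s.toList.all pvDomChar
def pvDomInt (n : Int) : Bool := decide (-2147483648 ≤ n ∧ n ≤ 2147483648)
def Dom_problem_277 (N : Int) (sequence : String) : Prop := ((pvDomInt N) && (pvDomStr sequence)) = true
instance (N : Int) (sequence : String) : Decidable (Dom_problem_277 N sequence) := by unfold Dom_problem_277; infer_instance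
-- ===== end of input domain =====

-- B replaces A's unbounded rational pair (a,b) and final modular inversion by a single
-- residue kept reduced mod 3^len(sequence), undoing /2 and /4 by exact integer division
-- after adding a suitable multiple of the (odd) modulus — no modular inverse at all.

-- ===== PORT A =====
-- Hand port of Python's pow(b, -1, m): for m > 0 and gcd(b,m) = 1 the unique inverse of b
-- in [0,m) is the Bézout coefficient gcdA reduced by Python's %; exact on those inputs
-- (the only ones A reaches: m = 3^k and b a power of 2).
def pyModInv (b m : Int) : Int := PySem.Int.mod (Int.gcdA b m) m

def stepA (ab : Int × Int) (c : Char) : Int × Int :=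
  if c = 'D' then (3 * ab.1, ab.2)
  else if c = 'U' then (3 * ab.1 - 2 * ab.2, 4 * ab.2)
  else if c = 'd' then (3 * ab.1 + ab.2, 2 * ab.2)
  else ab

def problem_277 (N : Int) (sequence : String) : Int :=
  let ab := sequence.toList.reverse.foldl stepA (1, 1)
  let m := (3 : Int) ^ sequence.toList.length
  let n := ab.1 * pyModInv ab.2 m
  N + PySem.Int.mod (n - N) m

-- ===== PORT B =====
def stepB (m m4 : Int) (v : Int) (c : Char) : Int :=
  if c = 'D' then PySem.Int.mod (3 * v) m
  else if c = 'U' then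
    let t := PySem.Int.mod (3 * v - 2) m
    PySem.Int.floordiv (t + PySem.Int.mod (-t * m4) 4 * m) 4
  else if c = 'd' then
    let t := PySem.Int.mod (3 * v + 1) m
    PySem.Int.floordiv (t + PySem.Int.mod t 2 * m) 2
  else v

def problem_277_alt (N : Int) (sequence : String) : Int :=
  let m := (3 : Int) ^ sequence.toList.length
  let m4 := PySem.Int.mod m 4
  let v := sequence.toList.reverse.foldl (stepB m m4) (PySem.Int.mod 1 m)
  N + PySem.Int.mod (v - N) m

-- ===== PRECONDITION & SPEC =====
def Spec_problem_277 (N : Int) (sequence : String) (out : Int) : Prop := out = problem_277_alt N sequence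
instance (N : Int) (sequence : String) (out : Int) : Decidable (Spec_problem_277 N sequence out) := by unfold Spec_problem_277; infer_instance

-- ===== CLAIM (what is proved, stated in full; the proofs are below) =====
def Claim_equal_problem_277 : Prop := ∀ (N : Int) (sequence : String), Dom_problem_277 N sequence → Spec_problem_277 N sequence (problem_277 N sequence)

-- ===== LEMMAS AND PROOFS =====

theorem emod_modEq (x m : Int) : x % m ≡ x [ZMOD m] := Int.emod_emod_of_dvd _ dvd_rfl

theorem gcd_pow2_pow3 (e k : Nat) : Int.gcd ((2:Int) ^ e) ((3:Int) ^ k) = 1 := by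
  simp only [Int.gcd, Int.natAbs_pow]
  exact Nat.Coprime.pow e k (by decide)

theorem pyModInv_spec (b m : Int) (hm : 0 < m) (h : Int.gcd b m = 1) :
    b * pyModInv b m ≡ 1 [ZMOD m] := by
  have hid := Int.gcd_eq_gcd_ab b m
  rw [h] at hid
  push_cast at hid
  have h1 : b * Int.gcdA b m ≡ 1 [ZMOD m] := by
    rw [Int.ModEq]
    have : b * Int.gcdA b m = 1 - m * Int.gcdB b m := by linarith
    rw [this, Int.sub_mul_emod_self_left]
  calc b * pyModInv b m
      = b * (Int.gcdA b m % m) := by rw [pyModInv, PySem.Int.mod_eq_emod_of_pos hm]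
    _ ≡ b * Int.gcdA b m [ZMOD m] := (emod_modEq _ _).mul_left b
    _ ≡ 1 [ZMOD m] := h1

-- the adjusted value t + i*m is exactly divisible by c, given c ∣ t + j*m for the
-- unreduced shift j with i ≡ j [ZMOD c]
theorem dvd_adjust (c m t i j : Int) (hij : i ≡ j [ZMOD c]) (h : c ∣ t + j * m) :
    c ∣ t + i * m := by
  have h1 : t + i * m ≡ t + j * m [ZMOD c] := (hij.mul_right m).add_left t
  exact Int.modEq_zero_iff_dvd.mp (h1.trans (Int.modEq_zero_iff_dvd.mpr h))

theorem invariant (m m4 : Int) (hm : 0 < m) (hodd : m % 2 = 1) (hm4 : m4 ≡ m [ZMOD 4])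
    (l : List Char) (a b v : Int) (e : Nat) (hb : b = 2 ^ e)
    (hcong : b * v ≡ a [ZMOD m]) :
    ∃ e' : Nat, (l.foldl stepA (a, b)).2 = 2 ^ e' ∧
      (l.foldl stepA (a, b)).2 * (l.foldl (stepB m m4) v) ≡ (l.foldl stepA (a, b)).1 [ZMOD m] := by
  obtain ⟨jm, hjm⟩ := Int.odd_iff.mpr hodd
  induction l generalizing a b v e with
  | nil => exact ⟨e, hb, hcong⟩
  | cons c l ih =>
    simp only [List.foldl_cons, stepA, stepB]
    by_cases hD : c = 'D'
    · simp only [if_pos hD]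
      refine ih (3 * a) b (PySem.Int.mod (3 * v) m) e hb ?_
      rw [PySem.Int.mod_eq_emod_of_pos hm]
      calc b * (3 * v % m) ≡ b * (3 * v) [ZMOD m] := (emod_modEq _ _).mul_left b
        _ = 3 * (b * v) := by ring
        _ ≡ 3 * a [ZMOD m] := hcong.mul_left 3
    · by_cases hU : c = 'U'
      · simp only [if_neg hD, if_pos hU]
        set t := PySem.Int.mod (3 * v - 2) m with ht
        set i := PySem.Int.mod (-t * m4) 4 with hi
        have hij : i ≡ -t * m [ZMOD 4] := by
          rw [hi, PySem.Int.mod_eq_emod_of_pos (by norm_num : (0:Int) < 4)]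
          exact (emod_modEq _ _).trans (hm4.mul_left (-t))
        have hdvd : (4 : Int) ∣ t + i * m := by
          refine dvd_adjust 4 m t i (-t * m) hij ?_
          have h1 : t + (-t * m) * m = -t * (m * m - 1) := by ring
          have h2 : (4 : Int) ∣ m * m - 1 := ⟨jm * jm + jm, by rw [hjm]; ring⟩
          rw [h1]; exact Dvd.dvd.mul_left h2 (-t)
        refine ih (3 * a - 2 * b) (4 * b) (PySem.Int.floordiv (t + i * m) 4) (e + 2) (by rw [hb]; ring) ?_
        rw [PySem.Int.floordiv_eq_ediv_of_pos (by norm_num : (0:Int) < 4)]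
        have h4v : 4 * ((t + i * m) / 4) = t + i * m := Int.mul_ediv_cancel' hdvd
        have him : i * m ≡ 0 [ZMOD m] := Int.modEq_zero_iff_dvd.mpr (dvd_mul_left m i)
        calc 4 * b * ((t + i * m) / 4)
            = b * (4 * ((t + i * m) / 4)) := by ring
          _ = b * (t + i * m) := by rw [h4v]
          _ ≡ b * (t + 0) [ZMOD m] := (him.add_left t).mul_left b
          _ = b * t := by ring
          _ ≡ b * (3 * v - 2) [ZMOD m] := by
              rw [ht, PySem.Int.mod_eq_emod_of_pos hm]
              exact (emod_modEq _ _).mul_left b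
          _ = 3 * (b * v) - 2 * b := by ring
          _ ≡ 3 * a - 2 * b [ZMOD m] := (hcong.mul_left 3).sub_right _
      · by_cases hd : c = 'd'
        · simp only [if_neg hD, if_neg hU, if_pos hd]
          set t := PySem.Int.mod (3 * v + 1) m with ht
          set i := PySem.Int.mod t 2 with hi
          have hij : i ≡ t [ZMOD 2] := by
            rw [hi, PySem.Int.mod_eq_emod_of_pos (by norm_num : (0:Int) < 2)]
            exact emod_modEq _ _
          have hdvd : (2 : Int) ∣ t + i * m := by
            refine dvd_adjust 2 m t i t hij ?_
            have h1 : t + t * m = t * (m + 1) := by ring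
            have h2 : (2 : Int) ∣ m + 1 := ⟨jm + 1, by rw [hjm]; ring⟩
            rw [h1]; exact Dvd.dvd.mul_left h2 t
          refine ih (3 * a + b) (2 * b) (PySem.Int.floordiv (t + i * m) 2) (e + 1) (by rw [hb]; ring) ?_
          rw [PySem.Int.floordiv_eq_ediv_of_pos (by norm_num : (0:Int) < 2)]
          have h2v : 2 * ((t + i * m) / 2) = t + i * m := Int.mul_ediv_cancel' hdvd
          have him : i * m ≡ 0 [ZMOD m] := Int.modEq_zero_iff_dvd.mpr (dvd_mul_left m i)
          calc 2 * b * ((t + i * m) / 2)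
              = b * (2 * ((t + i * m) / 2)) := by ring
            _ = b * (t + i * m) := by rw [h2v]
            _ ≡ b * (t + 0) [ZMOD m] := (him.add_left t).mul_left b
            _ = b * t := by ring
            _ ≡ b * (3 * v + 1) [ZMOD m] := by
                rw [ht, PySem.Int.mod_eq_emod_of_pos hm]
                exact (emod_modEq _ _).mul_left b
            _ = 3 * (b * v) + b := by ring
            _ ≡ 3 * a + b [ZMOD m] := (hcong.mul_left 3).add_right _
        · simp only [if_neg hD, if_neg hU, if_neg hd]
          exact ih a b v e hb hcong

-- ===== VERDICT (by name: the statement is the Claim_ definition above) =====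
theorem problem_277_spec : Claim_equal_problem_277 := by
  intro N s _
  unfold Spec_problem_277 problem_277 problem_277_alt
  set k := s.toList.length with hk
  have hm : (0 : Int) < 3 ^ k := by positivity
  have hodd : ((3:Int) ^ k) % 2 = 1 := Int.odd_iff.mp (Odd.pow ⟨1, by norm_num⟩)
  have hm4 : PySem.Int.mod ((3:Int) ^ k) 4 ≡ (3:Int) ^ k [ZMOD 4] := by
    rw [PySem.Int.mod_eq_emod_of_pos (by norm_num : (0:Int) < 4)]
    exact emod_modEq _ _
  have hinit : (1 : Int) * PySem.Int.mod 1 (3 ^ k) ≡ 1 [ZMOD (3:Int) ^ k] := by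
    rw [PySem.Int.mod_eq_emod_of_pos hm, one_mul]
    exact emod_modEq _ _
  obtain ⟨e', hb', hc⟩ := invariant ((3:Int) ^ k) (PySem.Int.mod ((3:Int) ^ k) 4) hm hodd hm4
    s.toList.reverse 1 1 (PySem.Int.mod 1 (3 ^ k)) 0 (by norm_num) hinit
  set A := s.toList.reverse.foldl stepA (1, 1) with hA
  set V := s.toList.reverse.foldl (stepB ((3:Int) ^ k) (PySem.Int.mod ((3:Int) ^ k) 4)) (PySem.Int.mod 1 (3 ^ k)) with hV
  have hinv : A.2 * pyModInv A.2 ((3:Int) ^ k) ≡ 1 [ZMOD (3:Int) ^ k] := by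
    refine pyModInv_spec _ _ hm ?_
    rw [hb']; exact gcd_pow2_pow3 e' k
  have hn : A.1 * pyModInv A.2 ((3:Int) ^ k) ≡ V [ZMOD (3:Int) ^ k] := by
    calc A.1 * pyModInv A.2 ((3:Int) ^ k)
        ≡ (A.2 * V) * pyModInv A.2 ((3:Int) ^ k) [ZMOD (3:Int) ^ k] := (hc.symm.mul_right _)
      _ = (A.2 * pyModInv A.2 ((3:Int) ^ k)) * V := by ring
      _ ≡ 1 * V [ZMOD (3:Int) ^ k] := hinv.mul_right _
      _ = V := by ring
  have heq := (hn.sub_right N)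
  rw [Int.ModEq] at heq
  show N + PySem.Int.mod (A.1 * pyModInv A.2 ((3:Int) ^ k) - N) (3 ^ k) =
    N + PySem.Int.mod (V - N) (3 ^ k)
  rw [PySem.Int.mod_eq_emod_of_pos hm, PySem.Int.mod_eq_emod_of_pos hm]
  rw [heq]
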